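-- pv_equiv track=rewrite | github.com/minyoung62/Algorithm-Study | programmers/2022_KAKAO_BLIND_RECRUITMENT/신고결과받기.py | solution
-- ===== SOURCE A (Python) =====
-- def solution(id_list, report, k):
--     answer = []
--
--     reportCount = dict((x,0) for x in id_list)
--     revers = dict((x,set()) for x in id_list)
--
--     # report 분리
--     for r in report:
--         reporter, reported=r.split()
--         if reporter not in revers[reported]:
--             reportCount[reported] += 1
--         revers[reported].add(reporter)
--
--     # 신고 결과
--     result = dict((x,0) for x in id_list)
--
--     # 신고당한 횟수 count
--     for key in reportCount.keys():
--         if reportCount[key] >= k: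
--             for reporter in revers[key]:
--                 result[reporter] += 1
--
--     answer = list(result.values())
--
--     return answer
-- ===== SOURCE B (Python) =====
-- # Dict-free pull re-implementation: build the set of distinct (reporter, reported)
-- # pairs once, decide "banned" per reported user by scanning that set, and count each
-- # user's banned targets with a nested comprehension -- no counter dicts, no per-user
-- # reporter sets, no push loop.
-- def solution(id_list, report, k):
--     pairs = {tuple(r.split()) for r in report}
--
--     def banned(b):
--         return sum(1 for (x, y) in pairs if y == b) >= k
--
--     return [sum(1 for (x, y) in pairs if x == u and banned(y))
--             for u in dict.fromkeys(id_list)]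
-- ===== Notes on version B (the rewrite author's own statement) =====
-- stated objective: simpler
-- what changed: A builds per-user reporter sets and counter dicts and pushes +1 to every reporter of each over-reported user; B uses no dicts at all: it builds one set of distinct (reporter, reported) pairs and answers each user by a nested scan, counting their pairs whose target is banned, where banned is decided by re-scanning the pair set.
-- outside the precondition, e.g. on solution(['a'], ['b a'], 1): A raises KeyError, B returns [0]; on solution(['a'], ['a b'], 1): A raises KeyError, B returns [1]; on solution(['a'], ['a'], 1): A raises ValueError, B raises ValueError
import Mathlib
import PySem

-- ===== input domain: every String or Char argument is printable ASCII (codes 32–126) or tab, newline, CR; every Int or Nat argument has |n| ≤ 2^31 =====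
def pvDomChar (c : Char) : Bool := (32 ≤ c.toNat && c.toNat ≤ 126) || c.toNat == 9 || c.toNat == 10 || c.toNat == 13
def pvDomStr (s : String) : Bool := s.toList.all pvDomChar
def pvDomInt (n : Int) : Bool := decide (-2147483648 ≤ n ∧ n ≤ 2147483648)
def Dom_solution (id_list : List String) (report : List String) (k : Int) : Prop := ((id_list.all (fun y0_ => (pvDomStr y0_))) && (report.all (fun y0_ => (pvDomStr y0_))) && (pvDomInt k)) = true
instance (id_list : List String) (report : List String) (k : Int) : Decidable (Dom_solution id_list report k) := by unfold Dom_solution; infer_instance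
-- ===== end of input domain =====

-- B replaces A's counter dicts, per-user reporter sets and push loop by a dict-free
-- nested scan over the set of distinct (reporter, reported) pairs (objective: simpler).

-- ===== PORT A =====
-- dict((x,0) for x in id_list)  (used for reportCount and for result)
def pvInitZero (id_list : List String) : PySem.Dict String Int :=
  id_list.foldl (fun d x => d.insert x 0) PySem.Dict.empty

-- dict((x,set()) for x in id_list)
def pvInitSets (id_list : List String) : PySem.Dict String (PySem.Set String) :=
  id_list.foldl (fun d x => d.insert x PySem.Set.empty) PySem.Dict.empty

-- the body of 'for r in report': reporter, reported = r.split(); …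
-- revers[reported] / reportCount[reported] raise KeyError when reported is not a key, and
-- a split of length ≠ 2 raises ValueError: those inputs are excluded by Pre_ below, so the
-- getD/modify/fall-through defaults here are exact on the admitted domain.
def pvReportStep (st : PySem.Dict String Int × PySem.Dict String (PySem.Set String))
    (r : String) : PySem.Dict String Int × PySem.Dict String (PySem.Set String) :=
  match PySem.Str.split₀ r with
  | [reporter, reported] =>
    let s := st.2.getD reported PySem.Set.empty
    let rc := if reporter ∈ s then st.1 else st.1.modify reported 0 (· + 1)
    (rc, st.2.insert reported (PySem.Set.add s reporter))
  | _ => st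

-- Python iterates 'for reporter in revers[key]' in hash order, which PySem does not model;
-- the loop only does commutative increments into 'result', so insertion order gives the
-- same dict, and that is the order this port uses.
def solution (id_list : List String) (report : List String) (k : Int) : List Int :=
  let reportCount := pvInitZero id_list
  let revers := pvInitSets id_list
  let st := report.foldl pvReportStep (reportCount, revers)
  let result := pvInitZero id_list
  let result := st.1.keys.foldl (fun res key =>
      if st.1.getD key 0 ≥ k then
        (st.2.getD key PySem.Set.empty).foldl (fun res reporter => res.modify reporter 0 (· + 1)) res
      else res) result
  result.values

-- ===== PORT B =====
-- tuple(r.split()); a split of length ≠ 2 makes B raise later — excluded by Pre_,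
-- so the ("","") default is never reached on the admitted domain.
def pvPair (r : String) : String × String :=
  match PySem.Str.split₀ r with
  | [a, b] => (a, b)
  | _ => ("", "")

-- B's set comprehension, the banned predicate (a scan over the pair set), and the nested
-- counting comprehension; each 'sum(1 for … if cond)' is the length of the filtered list.
-- Sums over the pair Set are iteration-order independent, so the insertion order is exact.
def solution_alt (id_list : List String) (report : List String) (k : Int) : List Int :=
  let pairs : PySem.Set (String × String) := PySem.Set.ofList (report.map pvPair)
  let banned : String → Bool := fun b =>
    decide (k ≤ (((pairs.filter (fun p => p.2 == b)).length : Int)))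
  (PySem.List.dedup id_list).map (fun u =>
    (((pairs.filter (fun p => p.1 == u && banned p.2)).length : Int)))

-- ===== PRECONDITION & SPEC =====
-- Pre_ excludes reports that do not split into exactly two tokens (A raises ValueError) and
-- reports naming a user outside id_list (A raises KeyError on revers[reported], or on
-- result[reporter] once the reported user reaches the threshold).
def Pre_solution (id_list : List String) (report : List String) (k : Int) : Prop :=
  ∀ r ∈ report, ∃ a ∈ id_list, ∃ b ∈ id_list, PySem.Str.split₀ r = [a, b]
instance (id_list : List String) (report : List String) (k : Int) : Decidable (Pre_solution id_list report k) := by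
  unfold Pre_solution; infer_instance

def pvWitness_solution : List String × List String × Int :=
  (["muzi", "frodo", "apeach"], ["muzi frodo", "apeach frodo", "muzi frodo"], 2)

def Spec_solution (id_list : List String) (report : List String) (k : Int) (out : List Int) : Prop := out = solution_alt id_list report k
instance (id_list : List String) (report : List String) (k : Int) (out : List Int) : Decidable (Spec_solution id_list report k out) := by unfold Spec_solution; infer_instance

-- ===== CLAIM (what is proved, stated in full; the proofs are below) =====
def Claim_equal_solution : Prop := ∀ (id_list : List String) (report : List String) (k : Int), Dom_solution id_list report k → Pre_solution id_list report k → Spec_solution id_list report k (solution id_list report k)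

-- ===== LEMMAS AND PROOFS =====

-- pvReportStep on a well-formed report string, phrased over the pair it splits into
def pvStepP (st : PySem.Dict String Int × PySem.Dict String (PySem.Set String))
    (p : String × String) : PySem.Dict String Int × PySem.Dict String (PySem.Set String) :=
  let s := st.2.getD p.2 PySem.Set.empty
  (if p.1 ∈ s then st.1 else st.1.modify p.2 0 (· + 1),
   st.2.insert p.2 (PySem.Set.add s p.1))

lemma pvReportStep_eq (st : PySem.Dict String Int × PySem.Dict String (PySem.Set String))
    (r : String) (a b : String) (h : PySem.Str.split₀ r = [a, b]) :
    pvReportStep st r = pvStepP st (a, b) := by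
  simp [pvReportStep, pvStepP, h]

lemma pvPair_eq (r a b : String) (h : PySem.Str.split₀ r = [a, b]) : pvPair r = (a, b) := by
  simp [pvPair, h]

lemma pvInitZero_getD (l : List String) (v : String) : (pvInitZero l).getD v 0 = 0 := by
  have h : ∀ (d : PySem.Dict String Int), (∀ w, d.getD w 0 = 0) →
      (l.foldl (fun d x => d.insert x 0) d).getD v 0 = 0 := by
    induction l with
    | nil => intro d hd; simpa using hd v
    | cons x xs ih =>
      intro d hd
      simp only [List.foldl_cons]
      refine ih _ ?_
      intro w
      by_cases hw : w = x
      · subst hw; simp [PySem.Dict.getD_insert_self]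
      · rw [PySem.Dict.getD_insert_of_ne _ _ _ hw]; exact hd w
  exact h _ (fun w => by simp [pysem])

lemma pvInitZero_keys (l : List String) : (pvInitZero l).keys = PySem.List.dedup l := by
  unfold pvInitZero
  rw [PySem.Dict.keys_foldl_insert _ (fun _ _ => 0)]
  simp [pysem, PySem.List.dedup_eq_ofList, PySem.Set.ofList_eq_foldl, PySem.Set.update]

lemma pvInitSets_getD (l : List String) (v : String) :
    (pvInitSets l).getD v PySem.Set.empty = PySem.Set.empty := by
  have h : ∀ (d : PySem.Dict String (PySem.Set String)), (∀ w, d.getD w PySem.Set.empty = PySem.Set.empty) →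
      (l.foldl (fun d x => d.insert x PySem.Set.empty) d).getD v PySem.Set.empty = PySem.Set.empty := by
    induction l with
    | nil => intro d hd; simpa using hd v
    | cons x xs ih =>
      intro d hd
      simp only [List.foldl_cons]
      refine ih _ ?_
      intro w
      by_cases hw : w = x
      · subst hw; simp [PySem.Dict.getD_insert_self]
      · rw [PySem.Dict.getD_insert_of_ne _ _ _ hw]; exact hd w
  exact h _ (fun w => by simp [pysem])

lemma pvSet_update_of_subset (s : PySem.Set String) (xs : List String)
    (h : ∀ x ∈ xs, x ∈ s) : PySem.Set.update s xs = s := by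
  induction xs generalizing s with
  | nil => rfl
  | cons x xs ih =>
    have hx : PySem.Set.add s x = s := PySem.Set.add_of_mem (h x (by simp))
    have : PySem.Set.update s (x :: xs) = PySem.Set.update (PySem.Set.add s x) xs := rfl
    rw [this, hx]
    exact ih s (fun y hy => h y (List.mem_cons_of_mem _ hy))

-- stage-1 invariant of A's report loop
lemma pvStage1 (ps : List (String × String)) :
    ∀ (rc : PySem.Dict String Int) (rv : PySem.Dict String (PySem.Set String)),
    (∀ p ∈ ps, p.2 ∈ rc.keys) →
    (∀ v, rc.getD v 0 = (((rv.getD v PySem.Set.empty : List String).length : Int))) →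
    (ps.foldl pvStepP (rc, rv)).1.keys = rc.keys ∧
    (∀ v, (ps.foldl pvStepP (rc, rv)).2.getD v PySem.Set.empty
        = PySem.Set.update (rv.getD v PySem.Set.empty) ((ps.filter (fun p => p.2 == v)).map (·.1))) ∧
    (∀ v, (ps.foldl pvStepP (rc, rv)).1.getD v 0
        = (((ps.foldl pvStepP (rc, rv)).2.getD v PySem.Set.empty : List String).length : Int)) := by
  induction ps with
  | nil =>
    intro rc rv h2 hlen
    exact ⟨rfl, fun v => rfl, fun v => hlen v⟩
  | cons p ps ih =>
    intro rc rv h2 hlen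
    obtain ⟨a, b⟩ := p
    simp only [List.foldl_cons]
    have hstep : pvStepP (rc, rv) (a, b)
        = (if a ∈ rv.getD b PySem.Set.empty then rc else rc.modify b 0 (· + 1),
           rv.insert b (PySem.Set.add (rv.getD b PySem.Set.empty) a)) := rfl
    rw [hstep]
    have hb : b ∈ rc.keys := h2 (a, b) (by simp)
    have hkeys' : (if a ∈ rv.getD b PySem.Set.empty then rc else rc.modify b 0 (· + 1)).keys = rc.keys := by
      by_cases hab : a ∈ rv.getD b PySem.Set.empty
      · rw [if_pos hab]
      · rw [if_neg hab]
        have hk := PySem.Dict.keys_foldl_modify [b] (0 : Int) (fun _ _ v => v + 1) rc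
        simp only [List.foldl_cons, List.foldl_nil] at hk
        rw [hk]
        exact pvSet_update_of_subset _ _ (by intro x hx; simp only [List.mem_singleton] at hx; subst hx; exact hb)
    have hgd' : ∀ v, (if a ∈ rv.getD b PySem.Set.empty then rc else rc.modify b 0 (· + 1)).getD v 0
        = (((rv.insert b (PySem.Set.add (rv.getD b PySem.Set.empty) a)).getD v PySem.Set.empty : List String).length : Int) := by
      intro v
      by_cases hv : v = b
      · subst hv
        rw [PySem.Dict.getD_insert_self]
        by_cases hab : a ∈ rv.getD v PySem.Set.empty
        · rw [if_pos hab, PySem.Set.add_of_mem hab]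
          exact hlen v
        · rw [if_neg hab, PySem.Dict.getD_modify_self, PySem.Set.add_of_not_mem hab, hlen v]
          simp only [List.length_append, List.length_singleton]
          push_cast
          ring
      · rw [PySem.Dict.getD_insert_of_ne _ _ _ hv]
        by_cases hab : a ∈ rv.getD b PySem.Set.empty
        · rw [if_pos hab]
          exact hlen v
        · rw [if_neg hab, PySem.Dict.getD_modify_of_ne _ _ _ hv]
          exact hlen v
    have h2' : ∀ q ∈ ps, q.2 ∈ (if a ∈ rv.getD b PySem.Set.empty then rc else rc.modify b 0 (· + 1)).keys := by
      rw [hkeys']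
      intro q hq
      exact h2 q (List.mem_cons_of_mem _ hq)
    obtain ⟨ihk, ihrv, ihlen⟩ := ih _ _ h2' hgd'
    refine ⟨ihk.trans hkeys', ?_, ihlen⟩
    intro v
    rw [ihrv v]
    by_cases hv : b = v
    · subst hv
      have hf : ((a, b) :: ps).filter (fun p => p.2 == b) = (a, b) :: ps.filter (fun p => p.2 == b) := by
        simp
      rw [hf, PySem.Dict.getD_insert_self, List.map_cons]
      rfl
    · rw [PySem.Dict.getD_insert_of_ne _ _ _ (Ne.symm hv)]
      have hf : ((a, b) :: ps).filter (fun p => p.2 == v) = ps.filter (fun p => p.2 == v) := by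
        simp [hv]
      rw [hf]

-- stage-2: the scatter loop, value read
lemma pvStage2_getD (F : String → PySem.Set String) (cond : String → Prop)
    [DecidablePred cond] (u : String) (ks : List String) :
    ∀ (res : PySem.Dict String Int),
    (ks.foldl (fun res key =>
        if cond key then (F key).foldl (fun r a => r.modify a 0 (· + 1)) res else res) res).getD u 0
      = res.getD u 0
        + (((ks.filter (fun v => decide (cond v))).map (fun v => (((F v : List String).count u : Int)))).sum) := by
  induction ks with
  | nil => intro res; simp
  | cons key ks ih =>
    intro res
    simp only [List.foldl_cons, List.filter_cons]
    by_cases hc : cond key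
    · rw [if_pos hc, ih]
      have hinner := PySem.Dict.getD_foldl_modify_add_one (F key : List String) res u
      simp only [decide_eq_true hc, reduceIte, List.map_cons, List.sum_cons]
      rw [show ((F key).foldl (fun r a => r.modify a 0 (· + 1)) res) = ((F key : List String).foldl (fun d x => d.modify x 0 fun x => x + 1) res) from rfl, hinner]
      ring
    · rw [if_neg hc, ih, decide_eq_false hc]
      simp

-- stage-2: the scatter loop preserves the keys
lemma pvStage2_keys (F : String → PySem.Set String) (cond : String → Prop)
    [DecidablePred cond] (ks : List String) :
    ∀ (res : PySem.Dict String Int), (∀ v, ∀ x ∈ F v, x ∈ res.keys) →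
    (ks.foldl (fun res key =>
        if cond key then (F key).foldl (fun r a => r.modify a 0 (· + 1)) res else res) res).keys
      = res.keys := by
  induction ks with
  | nil => intro res _; rfl
  | cons key ks ih =>
    intro res hF
    simp only [List.foldl_cons]
    by_cases hc : cond key
    · rw [if_pos hc]
      have hk : ((F key).foldl (fun r a => r.modify a 0 (· + 1)) res).keys = res.keys := by
        have h := PySem.Dict.keys_foldl_modify (F key : List String) (0 : Int) (fun _ _ v => v + 1) res
        rw [show ((F key).foldl (fun r a => r.modify a 0 (· + 1)) res) = ((F key : List String).foldl (fun d x => d.modify x 0 fun x => x + 1) res) from rfl, h]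
        exact pvSet_update_of_subset _ _ (hF key)
      refine (ih _ ?_).trans hk
      intro v x hx
      rw [hk]
      exact hF v x hx
    · rw [if_neg hc]
      exact ih _ hF

-- dedup commutes with filter
lemma pvDedup_filter {α : Type} [BEq α] [LawfulBEq α] (p : α → Bool) (l : List α) :
    PySem.List.dedup (l.filter p) = (PySem.List.dedup l).filter p := by
  have aux : ∀ (s : List α), (l.filter p).foldl PySem.Set.add (s.filter p)
      = (l.foldl PySem.Set.add s).filter p := by
    induction l with
    | nil => intro s; rfl
    | cons x l ih =>
      intro s
      by_cases hpx : p x = true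
      · simp only [List.filter_cons, hpx, if_pos, List.foldl_cons]
        have hadd : (PySem.Set.add s x).filter p = PySem.Set.add (s.filter p) x := by
          by_cases hxs : x ∈ s
          · rw [PySem.Set.add_of_mem hxs, PySem.Set.add_of_mem (List.mem_filter.mpr ⟨hxs, hpx⟩)]
          · rw [PySem.Set.add_of_not_mem hxs,
              PySem.Set.add_of_not_mem (fun hx => hxs (List.mem_filter.mp hx).1)]
            simp [List.filter_append, hpx]
        rw [← hadd]
        exact ih (PySem.Set.add s x)
      · have hadd : (PySem.Set.add s x).filter p = s.filter p := by
          by_cases hxs : x ∈ s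
          · rw [PySem.Set.add_of_mem hxs]
          · rw [PySem.Set.add_of_not_mem hxs]
            simp [List.filter_append, hpx]
        simp only [List.filter_cons, hpx, List.foldl_cons]
        rw [← ih (PySem.Set.add s x), hadd]
        simp
  have h := aux []
  simpa [PySem.List.dedup_eq_ofList, PySem.Set.ofList_eq_foldl] using h

-- dedup of the first components of pairs sharing one second component
lemma pvOfList_map_fst (v : String) (m : List (String × String)) (hm : ∀ p ∈ m, p.2 = v) :
    PySem.Set.ofList (m.map (·.1)) = (PySem.List.dedup m).map (·.1) := by
  have aux : ∀ (m : List (String × String)), (∀ p ∈ m, p.2 = v) →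
      ∀ (sp : List (String × String)), (∀ q ∈ sp, q.2 = v) →
      (m.map (·.1)).foldl PySem.Set.add (sp.map (·.1)) = ((m.foldl PySem.Set.add sp).map (·.1)) := by
    intro m
    induction m with
    | nil => intro _ sp _; rfl
    | cons p m ih =>
      intro hm sp hsp
      simp only [List.map_cons, List.foldl_cons]
      have hmem : (p.1 ∈ sp.map (·.1)) ↔ p ∈ sp := by
        constructor
        · intro h
          obtain ⟨q, hq, hq1⟩ := List.mem_map.mp h
          have hq2 : q.2 = p.2 := (hsp q hq).trans (hm p (by simp)).symm
          have : q = p := Prod.ext hq1 hq2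
          exact this ▸ hq
        · intro h
          exact List.mem_map.mpr ⟨p, h, rfl⟩
      have hadd : PySem.Set.add (sp.map (·.1)) p.1 = (PySem.Set.add sp p).map (·.1) := by
        by_cases hp : p ∈ sp
        · rw [PySem.Set.add_of_mem hp, PySem.Set.add_of_mem (hmem.mpr hp)]
        · rw [PySem.Set.add_of_not_mem hp, PySem.Set.add_of_not_mem (fun h => hp (hmem.mp h))]
          simp
      rw [hadd]
      refine ih (fun q hq => hm q (List.mem_cons_of_mem _ hq)) _ ?_
      intro q hq
      rcases (PySem.Set.mem_add _ _ _).mp hq with h | h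
      · exact hsp q h
      · exact h ▸ hm p (by simp)
  have h := aux m hm [] (by simp)
  simpa [PySem.List.dedup_eq_ofList, PySem.Set.ofList_eq_foldl] using h

-- indicator sum over a nodup list
lemma pvSum_indicator (u : String) (p : String × String) (L : List String) (hL : L.Nodup) :
    ((L.map (fun v => if (u, v) = p then (1 : Int) else 0)).sum)
      = if p.1 = u ∧ p.2 ∈ L then 1 else 0 := by
  induction L with
  | nil => simp
  | cons v L ih =>
    obtain ⟨hv, hL'⟩ := List.nodup_cons.mp hL
    simp only [List.map_cons, List.sum_cons, ih hL']
    by_cases h1 : (u, v) = p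
    · rw [if_pos h1,
        if_neg (fun h => hv (show v ∈ L by have := h.2; rw [← h1] at this; exact this)),
        if_pos ⟨(show p.1 = u by rw [← h1]), (show p.2 ∈ v :: L by rw [← h1]; simp)⟩]
      norm_num
    · rw [if_neg h1, zero_add]
      by_cases h2 : p.1 = u
      · by_cases h3 : p.2 = v
        · exact absurd (show (u, v) = p by rw [Prod.ext_iff]; exact ⟨h2.symm, h3.symm⟩) h1
        · simp [h2, h3, List.mem_cons]
      · simp [h2]

-- the scatter/gather exchange: A's push sum equals B's pull count
lemma pvExchange (u : String) (K : List String) (hK : K.Nodup) (cond : String → Bool) :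
    ∀ (Pl : List (String × String)), Pl.Nodup → (∀ p ∈ Pl, p.2 ∈ K) →
    ((K.filter cond).map (fun v => if (u, v) ∈ Pl then (1 : Int) else 0)).sum
      = (((Pl.filter (fun p => cond p.2)).map (·.1)).count u : Int) := by
  intro Pl
  induction Pl with
  | nil => intro _ _; simp
  | cons p Pl ih =>
    intro hnd hsub
    obtain ⟨hp, hnd'⟩ := List.nodup_cons.mp hnd
    have hsplit : ((K.filter cond).map (fun v => if (u, v) ∈ p :: Pl then (1 : Int) else 0))
        = ((K.filter cond).map (fun v =>
            (if (u, v) = p then (1 : Int) else 0) + (if (u, v) ∈ Pl then (1 : Int) else 0))) := by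
      apply List.map_congr_left
      intro v _
      by_cases h1 : (u, v) = p
      · rw [if_pos (by simp [h1]), if_pos h1, if_neg (fun h => hp (h1 ▸ h))]
        norm_num
      · by_cases h2 : (u, v) ∈ Pl
        · rw [if_pos (List.mem_cons_of_mem _ h2), if_neg h1, if_pos h2]
          norm_num
        · rw [if_neg (by simp [List.mem_cons, h1, h2]), if_neg h1, if_neg h2]
          norm_num
    rw [hsplit, PySem.List.sum_map_add_int,
      ih hnd' (fun q hq => hsub q (List.mem_cons_of_mem _ hq)),
      pvSum_indicator u p _ (List.Nodup.filter _ hK)]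
    by_cases hc : cond p.2 = true
    · have hm : p.2 ∈ K.filter cond := List.mem_filter.mpr ⟨hsub p (by simp), hc⟩
      simp only [List.filter_cons, hc, if_pos, List.map_cons]
      by_cases hu : p.1 = u
      · rw [if_pos ⟨hu, hm⟩]
        rw [List.count_cons, if_pos (by simp [hu])]
        push_cast
        ring
      · rw [if_neg (fun h => hu h.1)]
        rw [List.count_cons, if_neg (by simp [hu])]
        push_cast
        ring
    · simp only [List.filter_cons, hc]
      rw [if_neg (fun h => hc (List.mem_filter.mp h.2).2)]
      simp

-- B's nested count: counting u among the first components of the cond-filtered pairs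
-- is the length of the doubly-filtered pair list
lemma pvCountFstNat (u : String) (cond : String → Bool) (l : List (String × String)) :
    ((l.filter (fun p => cond p.2)).map (·.1)).count u
      = (l.filter (fun p => p.1 == u && cond p.2)).length := by
  induction l with
  | nil => rfl
  | cons p l ih =>
    by_cases hc : cond p.2 = true
    · by_cases hu : p.1 = u
      · simp [hc, hu, ih]
      · simp [hc, hu, ih]
    · simp [hc, ih]

lemma pvCountFst (u : String) (cond : String → Bool) (l : List (String × String)) :
    (((l.filter (fun p => cond p.2)).map (·.1)).count u : Int)
      = ((l.filter (fun p => p.1 == u && cond p.2)).length : Int) := by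
  exact_mod_cast pvCountFstNat u cond l

-- membership in the per-user reporter list
lemma pvMemM (report : List String) (v u : String) :
    (u ∈ ((PySem.List.dedup (report.map pvPair)).filter (fun p => p.2 == v)).map (·.1))
      ↔ (u, v) ∈ PySem.List.dedup (report.map pvPair) := by
  constructor
  · intro h
    obtain ⟨p, hp, hp1⟩ := List.mem_map.mp h
    obtain ⟨hpP, hpv⟩ := List.mem_filter.mp hp
    have : p = (u, v) := by
      obtain ⟨x, y⟩ := p
      simp only [beq_iff_eq] at hpv
      simp only at hp1 hpv
      rw [hp1, hpv]
    exact this ▸ hpP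
  · intro h
    exact List.mem_map.mpr ⟨(u, v), List.mem_filter.mpr ⟨h, by simp⟩, rfl⟩

-- the reporter list of v is the ofList of A's raw reporter stream
lemma pvMvOfList (report : List String) (v : String) :
    PySem.Set.ofList (((report.map pvPair).filter (fun p => p.2 == v)).map (·.1))
      = ((PySem.List.dedup (report.map pvPair)).filter (fun p => p.2 == v)).map (·.1) := by
  rw [pvOfList_map_fst v _ (fun p hp => by
    have := (List.mem_filter.mp hp).2
    simpa using this), pvDedup_filter]

-- ===== VERDICT (by name: the statement is the Claim_ definition above) =====
theorem solution_spec : Claim_equal_solution := by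
  intro id_list report k _hdom hpre
  unfold Spec_solution
  have hwf : ∀ p ∈ report.map pvPair, p.1 ∈ id_list ∧ p.2 ∈ id_list := by
    intro p hp
    obtain ⟨r, hr, rfl⟩ := List.mem_map.mp hp
    obtain ⟨a, ha, b, hb, hsp⟩ := hpre r hr
    rw [pvPair_eq r a b hsp]
    exact ⟨ha, hb⟩
  have hKnd : (PySem.List.dedup id_list).Nodup := by
    rw [PySem.List.dedup_eq_ofList]; exact PySem.Set.nodup_ofList _
  have hPnd : (PySem.List.dedup (report.map pvPair)).Nodup := by
    rw [PySem.List.dedup_eq_ofList]; exact PySem.Set.nodup_ofList _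
  have hPK : ∀ p ∈ PySem.List.dedup (report.map pvPair), p.2 ∈ PySem.List.dedup id_list := by
    intro p hp
    rw [PySem.List.dedup_eq_ofList, PySem.Set.mem_ofList] at hp ⊢
    exact (hwf p hp).2
  set P := PySem.List.dedup (report.map pvPair) with hP
  set K := PySem.List.dedup id_list with hKdef
  set condB : String → Bool := fun v => decide (k ≤ (((P.filter (fun p => p.2 == v)).length : Int))) with hcondB
  set M : String → List String := fun v => (P.filter (fun p => p.2 == v)).map (·.1) with hM
  have hMnd : ∀ v, (M v).Nodup := by
    intro v
    simp only [hM, hP, ← pvMvOfList]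
    exact PySem.Set.nodup_ofList _
  have hcnt : ∀ v u, ((M v).count u : Int) = if (u, v) ∈ P then 1 else 0 := by
    intro v u
    by_cases hm : (u, v) ∈ P
    · rw [if_pos hm, List.count_eq_one_of_mem (hMnd v) (by simp only [hM, hP]; exact (pvMemM report v u).mpr (hP ▸ hm))]
      norm_num
    · rw [if_neg hm, List.count_eq_zero.mpr (fun h => hm (by rw [hP]; exact (pvMemM report v u).mp (by simpa only [hM, hP] using h)))]
      norm_num
  -- ===== A side =====
  have hfold : report.foldl pvReportStep (pvInitZero id_list, pvInitSets id_list)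
      = (report.map pvPair).foldl pvStepP (pvInitZero id_list, pvInitSets id_list) := by
    rw [List.foldl_map]
    refine PySem.List.foldl_congr_mem report _ _ _ ?_
    intro st r hr
    obtain ⟨a, _, b, _, hsp⟩ := hpre r hr
    rw [pvReportStep_eq st r a b hsp, pvPair_eq r a b hsp]
  obtain ⟨hK1, hRv, hLen⟩ := pvStage1 (report.map pvPair) (pvInitZero id_list) (pvInitSets id_list)
    (by
      rw [pvInitZero_keys]
      intro p hp
      rw [PySem.List.dedup_eq_ofList, PySem.Set.mem_ofList]
      exact (hwf p hp).2)
    (by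
      intro v
      rw [pvInitZero_getD, pvInitSets_getD]
      rfl)
  set st := (report.map pvPair).foldl pvStepP (pvInitZero id_list, pvInitSets id_list) with hst
  have hF : ∀ v, (st.2.getD v PySem.Set.empty : List String) = M v := by
    intro v
    rw [hRv v, pvInitSets_getD]
    have hup : PySem.Set.update PySem.Set.empty (((report.map pvPair).filter (fun p => p.2 == v)).map (·.1))
        = PySem.Set.ofList (((report.map pvPair).filter (fun p => p.2 == v)).map (·.1)) := by
      rw [PySem.Set.ofList_eq_foldl]; rfl
    rw [hup, pvMvOfList]
  have hLen2 : ∀ v, st.1.getD v 0 = (((P.filter (fun p => p.2 == v)).length : Int)) := by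
    intro v
    rw [hLen v, hF v]
    simp only [hM]
    simp
  have hKeys : st.1.keys = K := by rw [hK1, pvInitZero_keys]
  have hFsub : ∀ v, ∀ x ∈ (st.2.getD v PySem.Set.empty : List String), x ∈ (pvInitZero id_list).keys := by
    intro v x hx
    rw [hF v] at hx
    simp only [hM] at hx
    obtain ⟨p, hp, hp1⟩ := List.mem_map.mp hx
    have hpP : p ∈ P := (List.mem_filter.mp hp).1
    have hp1' : p.1 ∈ id_list :=
      (hwf p (by rw [hP, PySem.List.dedup_eq_ofList] at hpP; exact (PySem.Set.mem_ofList _ _).mp hpP)).1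
    rw [pvInitZero_keys, PySem.List.dedup_eq_ofList, PySem.Set.mem_ofList, ← hp1]
    exact hp1'
  have hA : solution id_list report k
      = K.map (fun u => ((K.filter condB).map (fun v => if (u, v) ∈ P then (1 : Int) else 0)).sum) := by
    unfold solution
    dsimp only
    rw [hfold]
    rw [PySem.Dict.values_eq_map_keys _ (by
      rw [pvStage2_keys (fun v => st.2.getD v PySem.Set.empty) (fun v => st.1.getD v 0 ≥ k) st.1.keys (pvInitZero id_list) hFsub,
        pvInitZero_keys]
      exact hKnd) 0]
    rw [pvStage2_keys (fun v => st.2.getD v PySem.Set.empty) (fun v => st.1.getD v 0 ≥ k) st.1.keys (pvInitZero id_list) hFsub,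
      pvInitZero_keys, ← hKdef]
    apply List.map_congr_left
    intro u _
    rw [pvStage2_getD (fun v => st.2.getD v PySem.Set.empty) (fun v => st.1.getD v 0 ≥ k) u st.1.keys (pvInitZero id_list),
      pvInitZero_getD, zero_add, hKeys]
    rw [List.filter_congr (fun v _ => show decide (st.1.getD v 0 ≥ k) = condB v by
      simp only [hcondB]
      by_cases h : k ≤ (((P.filter (fun p => p.2 == v)).length : Int))
      · rw [decide_eq_true (show st.1.getD v 0 ≥ k by rw [hLen2 v]; exact h),
          decide_eq_true h]
      · rw [decide_eq_false (show ¬ st.1.getD v 0 ≥ k by rw [hLen2 v]; exact h),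
          decide_eq_false h])]
    apply congrArg
    apply List.map_congr_left
    intro v _
    rw [show (st.2.getD v PySem.Set.empty : List String) = M v from hF v]
    exact hcnt v u
  -- ===== B side =====
  have hB : solution_alt id_list report k
      = K.map (fun u => ((P.filter (fun p => p.1 == u && condB p.2)).length : Int)) := by
    unfold solution_alt
    dsimp only
    rw [← PySem.List.dedup_eq_ofList, ← hP, ← hKdef]
  rw [hA, hB]
  apply List.map_congr_left
  intro u _
  rw [pvExchange u K hKnd condB P hPnd hPK]
  exact pvCountFst u condB P
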